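-- pv_equiv track=rewrite | github.com/FNA2003/grupo1-tp1-v1 | lexer/AFDs.py | afd_asignation
-- ===== SOURCE A (Python) =====
-- def afd_asignation(cadena):
--     """El estado aceptado es 2"""
--     estados_sin_trampa = [0, 1, 2]
--     estados_aceptados = [2]
--     estados_no_aceptados = [0, 1]
--     estado_trampa = 't'
--     estado = 0
--     caracteres = [':', '=']
--     delta = {
--     0: {':': 1, '=': 't'},
--     1: {':': 't', '=': 2},
--     2: {':': 't', '=': 't'},
--     't': {';': 't'}
--     }
--
--     for caracter in cadena:
--         if (estado in estados_sin_trampa) and (caracter in caracteres):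
--             estado = delta[estado][caracter]
--         elif (estado == 't') or not(caracter in caracteres):
--             estado = 't'
--             break
--
--     if estado in estados_aceptados:
--         estado_final = 'aceptado'
--     elif estado in estados_no_aceptados:
--         estado_final = 'no aceptado'
--     elif estado == estado_trampa:
--         estado_final = 'trampa'
--
--     return estado_final
-- ===== SOURCE B (Python) =====
-- def afd_asignation(cadena):
--     """El estado aceptado es 2"""
--     items = list(cadena)
--     if items == [':', '=']:
--         return 'aceptado'
--     if items == [] or items == [':']:
--         return 'no aceptado'
--     return 'trampa'
-- ===== Notes on version B (the rewrite author's own statement) =====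
-- stated objective: simpler
-- what changed: Replaces the state-table DFA scan (state variable, delta dict, early break) with a single closed-form comparison of list(cadena) against the literal two-character assignment token and its proper prefixes.
import Mathlib
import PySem

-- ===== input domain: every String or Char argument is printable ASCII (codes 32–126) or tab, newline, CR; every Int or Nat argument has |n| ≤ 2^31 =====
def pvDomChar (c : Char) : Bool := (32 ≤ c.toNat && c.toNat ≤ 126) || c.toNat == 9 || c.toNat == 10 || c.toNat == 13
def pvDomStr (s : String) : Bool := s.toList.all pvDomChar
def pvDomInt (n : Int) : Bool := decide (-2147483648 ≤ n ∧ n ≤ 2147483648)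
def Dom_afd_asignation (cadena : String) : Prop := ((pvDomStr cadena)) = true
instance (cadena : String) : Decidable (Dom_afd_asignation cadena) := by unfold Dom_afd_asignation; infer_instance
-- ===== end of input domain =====

-- B replaces A's state-table DFA scan by one closed-form comparison against the assignment token and
-- its proper prefixes (objective: simpler).

-- ===== PORT A =====
-- Python A's states: 0, 1, 2 and the trap 't' (a string in Python, a constructor here).
inductive AfdState
  | s0 | s1 | s2 | t
  deriving DecidableEq, Repr

-- delta[estado][caracter]; only ever consulted with estado ∈ {0,1,2} and caracter ∈ {':','='}.
def afdDelta (estado : AfdState) (caracter : Char) : AfdState :=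
  match estado, caracter with
  | .s0, ':' => .s1
  | .s0, _   => .t
  | .s1, '=' => .s2
  | .s1, _   => .t
  | _,   _   => .t

-- the for-loop with its early break (break = return current 't' state immediately)
def afdLoop (estado : AfdState) (cs : List Char) : AfdState :=
  match cs with
  | [] => estado
  | caracter :: rest =>
    if estado ≠ AfdState.t ∧ (caracter = ':' ∨ caracter = '=') then
      afdLoop (afdDelta estado caracter) rest
    else if estado = AfdState.t ∨ ¬ (caracter = ':' ∨ caracter = '=') then
      AfdState.t   -- estado = 't'; break
    else
      afdLoop estado rest

def afd_asignation (cadena : String) : String :=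
  let estado := afdLoop AfdState.s0 cadena.toList
  if estado = AfdState.s2 then "aceptado"
  else if estado = AfdState.s0 ∨ estado = AfdState.s1 then "no aceptado"
  else "trampa"

-- ===== PORT B =====
def afd_asignation_alt (cadena : String) : String :=
  let items := cadena.toList
  if items = [':', '='] then "aceptado"
  else if items = [] ∨ items = [':'] then "no aceptado"
  else "trampa"

-- ===== PRECONDITION & SPEC =====
def Spec_afd_asignation (cadena : String) (out : String) : Prop := out = afd_asignation_alt cadena
instance (cadena : String) (out : String) : Decidable (Spec_afd_asignation cadena out) := by unfold Spec_afd_asignation; infer_instance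

-- ===== CLAIM (what is proved, stated in full; the proofs are below) =====
def Claim_equal_afd_asignation : Prop := ∀ (cadena : String), Dom_afd_asignation cadena → Spec_afd_asignation cadena (afd_asignation cadena)

-- ===== LEMMAS AND PROOFS =====

-- once trapped, the loop ends in the trap state
theorem afdLoop_t (cs : List Char) : afdLoop AfdState.t cs = AfdState.t := by
  cases cs with
  | nil => rfl
  | cons c rest => simp [afdLoop]

-- from the accepting state, any further character traps
theorem afdLoop_s2 (c : Char) (cs : List Char) :
    afdLoop AfdState.s2 (c :: cs) = AfdState.t := by
  by_cases h : c = ':' ∨ c = '='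
  · rcases h with h | h <;> subst h <;> simp [afdLoop, afdDelta, afdLoop_t]
  · simp [afdLoop, h]

theorem afd_asignation_eq (cadena : String) :
    afd_asignation cadena = afd_asignation_alt cadena := by
  unfold afd_asignation afd_asignation_alt
  match hls : cadena.toList with
  | [] => simp [afdLoop]
  | [c] =>
    by_cases hc : c = ':'
    · simp [hc, afdLoop, afdDelta]
    · by_cases he : c = '='
      · simp [he, afdLoop, afdDelta]
      · simp [afdLoop, hc, he]
  | c1 :: c2 :: rest =>
    by_cases h1 : c1 = ':'
    · subst h1
      by_cases h2 : c2 = '='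
      · subst h2
        cases rest with
        | nil => simp [afdLoop, afdDelta]
        | cons c3 r3 =>
          have h : afdLoop AfdState.s0 (':' :: '=' :: c3 :: r3) = AfdState.t := by
            have h2 : afdLoop AfdState.s0 (':' :: '=' :: c3 :: r3)
                = afdLoop AfdState.s2 (c3 :: r3) := rfl
            rw [h2, afdLoop_s2]
          simp [h]
      · by_cases h2' : c2 = ':'
        · subst h2'
          simp [afdLoop, afdDelta, afdLoop_t, h2]
        · simp [afdLoop, afdDelta, h2, h2']
    · by_cases h1' : c1 = '='
      · subst h1'
        simp [afdLoop, afdDelta, h1]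
      · simp [afdLoop, h1, h1']

-- ===== VERDICT (by name: the statement is the Claim_ definition above) =====
theorem afd_asignation_spec : Claim_equal_afd_asignation := by
  intro cadena _
  exact afd_asignation_eq cadena
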